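-- pv_equiv track=rewrite | github.com/deskwar034/Whatsapp-msg | streamlit_app.py | dividir_texto_em_blocos
-- ===== SOURCE A (Python) =====
-- def dividir_texto_em_blocos(texto, limite_caracteres=500):
--     """
--     Divide o texto em blocos menores respeitando as quebras de linha,
--     para não cortar as palavras no meio.
--     """
--     linhas = texto.split('\n')
--     blocos = []
--     bloco_atual = ""
--
--     for linha in linhas:
--         # Se adicionar a próxima linha ultrapassar o limite, salva o bloco atual e começa um novo
--         if len(bloco_atual) + len(linha) > limite_caracteres:
--             if bloco_atual:
--                 blocos.append(bloco_atual.strip())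
--             bloco_atual = linha + "\n"
--         else:
--             bloco_atual += linha + "\n"
--
--     # Adiciona o último bloco que sobrou
--     if bloco_atual.strip():
--         blocos.append(bloco_atual.strip())
--
--     return blocos
-- ===== SOURCE B (Python) =====
-- def dividir_texto_em_blocos(texto, limite_caracteres=500):
--     """Chunking decomposition: repeatedly cut off the maximal prefix of lines
--     that fits (first line of a chunk is always taken), then render each chunk
--     as '\n'.join(chunk).strip(); the last chunk is kept only if non-blank."""
--     linhas = texto.split('\n')
--     grupos = []
--     i, n = 0, len(linhas)
--     while i < n:
--         j = i + 1
--         cont = len(linhas[i]) + 1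
--         while j < n and cont + len(linhas[j]) <= limite_caracteres:
--             cont += len(linhas[j]) + 1
--             j += 1
--         grupos.append(linhas[i:j])
--         i = j
--     blocos = ['\n'.join(g).strip() for g in grupos[:-1]]
--     ultimo = '\n'.join(grupos[-1]).strip()
--     if ultimo:
--         blocos.append(ultimo)
--     return blocos
-- ===== Notes on version B (the rewrite author's own statement) =====
-- stated objective: alternative
-- what changed: Replaces A's single per-line fold with a flush branch and string accumulator by a chunking algorithm: an outer loop repeatedly cuts off the maximal prefix of lines that fits (inner scan with a running count), collects those line-groups, and a second phase renders each group with '\n'.join(...).strip().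
import Mathlib
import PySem

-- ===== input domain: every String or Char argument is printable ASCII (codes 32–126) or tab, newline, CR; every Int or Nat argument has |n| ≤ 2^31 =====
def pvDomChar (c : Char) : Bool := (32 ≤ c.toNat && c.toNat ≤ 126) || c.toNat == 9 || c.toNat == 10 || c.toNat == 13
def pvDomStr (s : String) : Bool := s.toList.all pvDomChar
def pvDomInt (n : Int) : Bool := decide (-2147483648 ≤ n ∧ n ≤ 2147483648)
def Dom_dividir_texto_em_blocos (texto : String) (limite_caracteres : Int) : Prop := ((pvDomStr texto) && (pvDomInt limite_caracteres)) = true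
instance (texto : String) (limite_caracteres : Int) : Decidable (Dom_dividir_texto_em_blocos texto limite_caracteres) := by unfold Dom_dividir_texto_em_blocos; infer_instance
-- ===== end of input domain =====

-- B replaces A's per-line fold (flush branch + string accumulator) by a chunking algorithm:
-- cut off the maximal fitting prefix of lines per chunk, then render each chunk; same value.


-- ===== PORT A =====
-- one iteration of A's for-loop; state = (blocos, bloco_atual), strings as List Char
def pvAStep (lim : Int) (st : List (List Char) × List Char) (linha : List Char) :
    List (List Char) × List Char :=
  if ((st.2.length : Int) + (linha.length : Int) > lim) then
    (if st.2 ≠ [] then st.1 ++ [PySem.Chars.strip st.2] else st.1, linha ++ ['\n'])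
  else
    (st.1, st.2 ++ linha ++ ['\n'])

def dividir_texto_em_blocos (texto : String) (limite_caracteres : Int) : List String :=
  let linhas := PySem.Chars.splitOn texto.toList ['\n']
  let st := linhas.foldl (pvAStep limite_caracteres) ([], [])
  let blocos := if PySem.Chars.strip st.2 ≠ [] then st.1 ++ [PySem.Chars.strip st.2] else st.1
  blocos.map (fun l => String.mk l)

-- ===== PORT B =====
-- '\n'.join(g).strip()
def pvRender (g : List (List Char)) : List Char :=
  PySem.Chars.strip (PySem.Chars.join ['\n'] g)

-- B's inner while loop: extend the current chunk (running count cont) with the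
-- lines that still fit; returns (lines taken, remaining lines)
def pvTake (lim : Int) (cont : Int) : List (List Char) → List (List Char) × List (List Char)
  | [] => ([], [])
  | l :: ls =>
    if cont + (l.length : Int) ≤ lim then
      let r := pvTake lim (cont + (l.length : Int) + 1) ls
      (l :: r.1, r.2)
    else
      ([], l :: ls)

theorem pvTake_snd_length_le (lim : Int) : ∀ (cont : Int) (ls : List (List Char)),
    (pvTake lim cont ls).2.length ≤ ls.length := by
  intro cont ls
  induction ls generalizing cont with
  | nil => simp [pvTake]
  | cons l ls ih =>
    simp only [pvTake]
    split
    · exact Nat.le_succ_of_le (ih _)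
    · exact Nat.le_refl _

-- B's outer while loop: the list of chunks (each chunk starts with the next line)
def pvGroups (lim : Int) : List (List Char) → List (List (List Char))
  | [] => []
  | l :: ls =>
    let r := pvTake lim ((l.length : Int) + 1) ls
    (l :: r.1) :: pvGroups lim r.2
termination_by ls => ls.length
decreasing_by
  exact Nat.lt_succ_of_le (pvTake_snd_length_le _ _ _)

def dividir_texto_em_blocos_alt (texto : String) (limite_caracteres : Int) : List String :=
  let linhas := PySem.Chars.splitOn texto.toList ['\n']
  let gs := pvGroups limite_caracteres linhas
  let blocos := gs.dropLast.map pvRender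
  match gs.getLast? with
  | none => blocos.map (fun l => String.mk l)
  | some g =>
    (if pvRender g ≠ [] then blocos ++ [pvRender g] else blocos).map (fun l => String.mk l)

-- ===== PRECONDITION & SPEC =====
def Spec_dividir_texto_em_blocos (texto : String) (limite_caracteres : Int) (out : List String) : Prop := out = dividir_texto_em_blocos_alt texto limite_caracteres
instance (texto : String) (limite_caracteres : Int) (out : List String) : Decidable (Spec_dividir_texto_em_blocos texto limite_caracteres out) := by unfold Spec_dividir_texto_em_blocos; infer_instance

-- ===== CLAIM (what is proved, stated in full; the proofs are below) =====
def Claim_equal_dividir_texto_em_blocos : Prop := ∀ (texto : String) (limite_caracteres : Int), Dom_dividir_texto_em_blocos texto limite_caracteres → Spec_dividir_texto_em_blocos texto limite_caracteres (dividir_texto_em_blocos texto limite_caracteres)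

-- ===== LEMMAS AND PROOFS =====

-- A's bloco_atual, reconstructed from the current chunk of lines
def pvFlat (g : List (List Char)) : List Char := (g.map (· ++ ['\n'])).flatten

theorem pvFlat_append_single (g : List (List Char)) (l : List Char) :
    pvFlat (g ++ [l]) = pvFlat g ++ (l ++ ['\n']) := by
  simp [pvFlat]

theorem pvFlat_eq_nil_iff (g : List (List Char)) : pvFlat g = [] ↔ g = [] := by
  cases g with
  | nil => simp [pvFlat]
  | cons a gs => simp [pvFlat]

theorem pvJoin_newline (g : List (List Char)) (h : g ≠ []) :
    PySem.Chars.join ['\n'] g ++ ['\n'] = pvFlat g := by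
  induction g with
  | nil => simp at h
  | cons a gs ih =>
    cases gs with
    | nil => simp [PySem.Chars.join_singleton, pvFlat]
    | cons b rest =>
      rw [PySem.Chars.join_cons_cons]
      have := ih (by simp)
      simp only [pvFlat, List.map_cons, List.flatten_cons] at this ⊢
      simp only [List.append_assoc, this]

theorem pvRstrip_append_nl (y : List Char) :
    PySem.Chars.rstrip (y ++ ['\n']) = PySem.Chars.rstrip y := by
  simp [PySem.Chars.rstrip, PySem.Chars.isspace]

theorem pvStrip_append_nl (x : List Char) :
    PySem.Chars.strip (x ++ ['\n']) = PySem.Chars.strip x := by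
  unfold PySem.Chars.strip PySem.Chars.lstrip
  rw [List.dropWhile_append]
  cases h : List.dropWhile PySem.Chars.isspace x with
  | nil => simp [PySem.Chars.rstrip, PySem.Chars.isspace]
  | cons c cs =>
    simp only [List.isEmpty_cons, ite_false, Bool.false_eq_true]
    exact pvRstrip_append_nl (c :: cs)

theorem pvStrip_flat (g : List (List Char)) :
    PySem.Chars.strip (pvFlat g) = pvRender g := by
  by_cases h : g = []
  · subst h
    decide
  · rw [pvRender, ← pvJoin_newline g h, pvStrip_append_nl]

-- final state of A's fold, computed from the chunk list: intermediate chunks are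
-- rendered into blocos, the last chunk is left in bloco_atual
def pvFinish (B : List (List Char)) : List (List (List Char)) → List (List Char) × List Char
  | [] => (B, [])
  | g :: gs =>
    match gs with
    | [] => (B, pvFlat g)
    | _ :: _ => pvFinish (B ++ [pvRender g]) gs

-- A's fold, started in the middle of a chunk, equals pvFinish of the remaining chunks
theorem pvLoop_chunks (lim : Int) : ∀ (ls : List (List Char)) (B : List (List Char))
    (atual : List (List Char)), atual ≠ [] →
    ls.foldl (pvAStep lim) (B, pvFlat atual)
      = pvFinish B ((atual ++ (pvTake lim ((pvFlat atual).length : Int) ls).1)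
          :: pvGroups lim (pvTake lim ((pvFlat atual).length : Int) ls).2) := by
  intro ls
  induction ls with
  | nil =>
    intro B atual h
    simp [pvTake, pvGroups, pvFinish]
  | cons l ls ih =>
    intro B atual h
    simp only [List.foldl_cons, pvTake]
    by_cases hc : ((pvFlat atual).length : Int) + (l.length : Int) ≤ lim
    · -- line still fits: A appends to bloco_atual, B's inner loop takes it
      have hA : pvAStep lim (B, pvFlat atual) l = (B, pvFlat (atual ++ [l])) := by
        unfold pvAStep
        rw [if_neg (show ¬(((pvFlat atual).length : Int) + (l.length : Int) > lim) by omega)]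
        rw [pvFlat_append_single, List.append_assoc]
      rw [hA, if_pos hc]
      have hlen : ((pvFlat (atual ++ [l])).length : Int)
          = ((pvFlat atual).length : Int) + (l.length : Int) + 1 := by
        rw [pvFlat_append_single]
        simp only [List.length_append, List.length_cons, List.length_nil]
        push_cast
        ring
      have := ih B (atual ++ [l]) (by simp)
      rw [hlen] at this
      rw [this]
      simp [List.append_assoc]
    · -- overflow: A flushes bloco_atual, B starts a new chunk with l
      have hfa : pvFlat atual ≠ [] := by simp [pvFlat_eq_nil_iff, h]
      have hA : pvAStep lim (B, pvFlat atual) l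
          = (B ++ [pvRender atual], pvFlat [l]) := by
        unfold pvAStep
        rw [if_pos (show ((pvFlat atual).length : Int) + (l.length : Int) > lim by omega),
          if_pos hfa, pvStrip_flat]
        congr 1
        simp [pvFlat]
      rw [hA, if_neg hc]
      have hl1 : ((pvFlat [l]).length : Int) = (l.length : Int) + 1 := by
        simp [pvFlat]
      have := ih (B ++ [pvRender atual]) [l] (by simp)
      rw [hl1] at this
      rw [this]
      conv_rhs => rw [pvGroups]
      simp [pvFinish]

-- rendering pvFinish's output the way port A does = port B's assembly
theorem pvFinish_assemble : ∀ (G : List (List (List Char))) (B : List (List Char)), G ≠ [] →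
    (if PySem.Chars.strip (pvFinish B G).2 ≠ [] then
        (pvFinish B G).1 ++ [PySem.Chars.strip (pvFinish B G).2]
      else (pvFinish B G).1)
    = (match G.getLast? with
       | none => B ++ G.dropLast.map pvRender
       | some g => if pvRender g ≠ [] then (B ++ G.dropLast.map pvRender) ++ [pvRender g]
                   else B ++ G.dropLast.map pvRender) := by
  intro G
  induction G with
  | nil => intro B h; exact absurd rfl h
  | cons g gs ih =>
    intro B _
    cases gs with
    | nil =>
      simp [pvFinish, pvStrip_flat, List.getLast?_singleton]
    | cons g' gs' =>
      have hstep : pvFinish B (g :: g' :: gs') = pvFinish (B ++ [pvRender g]) (g' :: gs') := rfl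
      have := ih (B ++ [pvRender g]) (by simp)
      rw [hstep, this]
      simp [List.getLast?_cons_cons, List.dropLast_cons_of_ne_nil]

-- ===== VERDICT (by name: the statement is the Claim_ definition above) =====
theorem dividir_texto_em_blocos_spec : Claim_equal_dividir_texto_em_blocos := by
  intro texto lim _
  unfold Spec_dividir_texto_em_blocos dividir_texto_em_blocos dividir_texto_em_blocos_alt
  cases hsplit : PySem.Chars.splitOn texto.toList ['\n'] with
  | nil => simp [pvGroups, PySem.Chars.strip, PySem.Chars.lstrip, PySem.Chars.rstrip]
  | cons l ls =>
    -- first iteration: both branches of A's if give bloco_atual = l + '\n'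
    have hfirst : pvAStep lim ([], []) l = ([], pvFlat [l]) := by
      simp [pvAStep, pvFlat]
    simp only [List.foldl_cons, hfirst]
    have hl1 : ((pvFlat [l]).length : Int) = (l.length : Int) + 1 := by simp [pvFlat]
    have hloop := pvLoop_chunks lim ls [] [l] (by simp)
    rw [hl1] at hloop
    rw [hloop]
    have hG : pvGroups lim (l :: ls)
        = (l :: (pvTake lim ((l.length : Int) + 1) ls).1)
          :: pvGroups lim (pvTake lim ((l.length : Int) + 1) ls).2 := by
      rw [pvGroups]
    rw [hG]
    rw [pvFinish_assemble _ [] (by simp)]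
    simp only [List.nil_append, List.singleton_append]
    cases hlast : ((l :: (pvTake lim ((l.length : Int) + 1) ls).1)
        :: pvGroups lim (pvTake lim ((l.length : Int) + 1) ls).2).getLast? with
    | none => simp at hlast
    | some g => split <;> rfl
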